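-- pv_equiv track=rewrite | github.com/rubix1138/jobhunter | src/jobhunter/applicators/base.py | _match_option
-- ===== SOURCE A (Python) =====
-- from typing import TYPE_CHECKING, Optional
--
-- def _match_option(value: str, options: list[str]) -> Optional[str]:
--     """Find the best matching option for a value (case-insensitive substring)."""
--     value_lower = value.lower()
--     # Exact match first
--     for opt in options:
--         if opt.lower() == value_lower:
--             return opt
--     # Substring match
--     for opt in options:
--         if value_lower in opt.lower() or opt.lower() in value_lower:
--             return opt
--     return None
-- ===== SOURCE B (Python) =====
-- def _match_option(value, options):
--     """Single pass: return the first exact case-insensitive match immediately;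
--     otherwise remember the first substring match as a fallback and return it at the end."""
--     value_lower = value.lower()
--     fallback = None
--     for opt in options:
--         opt_lower = opt.lower()
--         if opt_lower == value_lower:
--             return opt
--         if fallback is None and (value_lower in opt_lower or opt_lower in value_lower):
--             fallback = opt
--     return fallback
-- ===== Notes on version B (the rewrite author's own statement) =====
-- stated objective: alternative
-- what changed: Two full scans (exact pass, then substring pass) replaced by one pass that returns an exact match immediately and remembers the first substring match as a fallback, computing opt.lower() once per option.
import Mathlib
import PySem

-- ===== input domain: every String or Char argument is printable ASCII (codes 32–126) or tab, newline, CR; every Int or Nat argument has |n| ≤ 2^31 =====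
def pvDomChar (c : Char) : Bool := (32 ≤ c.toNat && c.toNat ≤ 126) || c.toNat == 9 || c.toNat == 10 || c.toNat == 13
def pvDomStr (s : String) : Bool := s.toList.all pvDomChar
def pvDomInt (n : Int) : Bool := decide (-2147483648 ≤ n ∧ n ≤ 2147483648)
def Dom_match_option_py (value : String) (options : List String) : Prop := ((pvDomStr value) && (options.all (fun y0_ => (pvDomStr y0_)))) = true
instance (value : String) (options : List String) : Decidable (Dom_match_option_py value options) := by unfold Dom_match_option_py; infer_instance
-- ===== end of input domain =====

-- B replaces A's two full scans by one pass that returns an exact match at once and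
-- remembers the first substring match as a fallback (alternative decomposition, same cost class).

-- ===== PORT A =====
-- exact-match predicate of A's first loop
def pvExact (vl : String) (opt : String) : Bool := PySem.Str.lower opt == vl
-- substring predicate of A's second loop
def pvSub (vl : String) (opt : String) : Bool :=
  PySem.Str.isIn vl (PySem.Str.lower opt) || PySem.Str.isIn (PySem.Str.lower opt) vl

def match_option_py (value : String) (options : List String) : Option String :=
  let value_lower := PySem.Str.lower value
  match options.find? (pvExact value_lower) with
  | some opt => some opt
  | none =>
    match options.find? (pvSub value_lower) with
    | some opt => some opt
    | none => none

-- ===== PORT B =====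
-- B's single loop: fb is the remembered fallback
def pvAltLoop (vl : String) (fb : Option String) : List String → Option String
  | [] => fb
  | opt :: rest =>
    let opt_lower := PySem.Str.lower opt
    if opt_lower == vl then some opt
    else if fb.isNone && (PySem.Str.isIn vl opt_lower || PySem.Str.isIn opt_lower vl) then
      pvAltLoop vl (some opt) rest
    else pvAltLoop vl fb rest

def match_option_py_alt (value : String) (options : List String) : Option String :=
  pvAltLoop (PySem.Str.lower value) none options

-- ===== PRECONDITION & SPEC =====
def Spec_match_option_py (value : String) (options : List String) (out : Option String) : Prop := out = match_option_py_alt value options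
instance (value : String) (options : List String) (out : Option String) : Decidable (Spec_match_option_py value options out) := by unfold Spec_match_option_py; infer_instance

-- ===== CLAIM (what is proved, stated in full; the proofs are below) =====
def Claim_equal_match_option_py : Prop := ∀ (value : String) (options : List String), Dom_match_option_py value options → Spec_match_option_py value options (match_option_py value options)

-- ===== LEMMAS AND PROOFS =====

-- B's loop invariant: with fallback fb, the result is the first exact match, else fb, else the first substring match.
theorem pvAltLoop_eq (vl : String) (fb : Option String) (opts : List String) :
    pvAltLoop vl fb opts =
      match opts.find? (pvExact vl) with
      | some o => some o
      | none => match fb with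
                | some f => some f
                | none => opts.find? (pvSub vl) := by
  induction opts generalizing fb with
  | nil => cases fb <;> simp [pvAltLoop]
  | cons o rest ih =>
    by_cases hx : (PySem.Str.lower o == vl) = true
    · simp [pvAltLoop, List.find?, pvExact, hx]
    · have hx' : (PySem.Str.lower o == vl) = false := by simpa using hx
      by_cases hs : (PySem.Str.isIn vl (PySem.Str.lower o) || PySem.Str.isIn (PySem.Str.lower o) vl) = true
      all_goals simp only [PySem.Str.isIn_eq, PySem.Str.toList_lower] at hs
      · cases fb with
        | none => simp [pvAltLoop, List.find?, pvExact, pvSub, hx', hs, ih]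
        | some f => simp [pvAltLoop, List.find?, pvExact, hx', ih]
      · simp only [Bool.not_eq_true] at hs
        cases fb <;> simp [pvAltLoop, List.find?, pvExact, pvSub, hx', hs, ih]

-- ===== VERDICT (by name: the statement is the Claim_ definition above) =====
theorem match_option_py_spec : Claim_equal_match_option_py := by
  intro value options _
  unfold Spec_match_option_py match_option_py match_option_py_alt
  rw [pvAltLoop_eq]
  cases h1 : options.find? (pvExact (PySem.Str.lower value)) with
  | some o => simp [h1]
  | none =>
    cases h2 : options.find? (pvSub (PySem.Str.lower value)) <;> simp [h1, h2]
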